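-- pv_equiv track=rewrite | github.com/omron-sinicx/com_kitchens | com_kitchens/data/components/comkitchens.py | iter_ap_boundaries
-- ===== SOURCE A (Python) =====
-- def iter_ap_boundaries(ap_ids, ap_segment="end"):
--     assert ap_segment in ("begin", "end")
--
--     last_ap_id, last_ap_idx = None, None
--     for i, ap_id in enumerate(ap_ids):
--         # at the ap index
--         if ap_id:
--             if last_ap_id:
--                 yield last_ap_id, (last_ap_idx + 1 if ap_segment == "end" else i)
--
--             last_ap_id = ap_id
--             last_ap_idx = i
--
--     else:
--         yield last_ap_id, len(ap_ids)
-- ===== SOURCE B (Python) =====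
-- def iter_ap_boundaries(ap_ids, ap_segment="end"):
--     assert ap_segment in ("begin", "end")
--
--     pts = [(i, a) for i, a in enumerate(ap_ids) if a]
--     if not pts:
--         yield None, len(ap_ids)
--         return
--     for (pi, pa), (ci, _ca) in zip(pts, pts[1:]):
--         yield pa, (pi + 1 if ap_segment == "end" else ci)
--     yield pts[-1][1], len(ap_ids)
-- ===== Notes on version B (the rewrite author's own statement) =====
-- stated objective: simpler
-- what changed: Replaces the running last-id/last-index state machine inside the scan by first filtering the truthy enumerated pairs and then yielding one boundary per adjacent pair via zip, plus a final entry for the tail segment.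
import Mathlib
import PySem

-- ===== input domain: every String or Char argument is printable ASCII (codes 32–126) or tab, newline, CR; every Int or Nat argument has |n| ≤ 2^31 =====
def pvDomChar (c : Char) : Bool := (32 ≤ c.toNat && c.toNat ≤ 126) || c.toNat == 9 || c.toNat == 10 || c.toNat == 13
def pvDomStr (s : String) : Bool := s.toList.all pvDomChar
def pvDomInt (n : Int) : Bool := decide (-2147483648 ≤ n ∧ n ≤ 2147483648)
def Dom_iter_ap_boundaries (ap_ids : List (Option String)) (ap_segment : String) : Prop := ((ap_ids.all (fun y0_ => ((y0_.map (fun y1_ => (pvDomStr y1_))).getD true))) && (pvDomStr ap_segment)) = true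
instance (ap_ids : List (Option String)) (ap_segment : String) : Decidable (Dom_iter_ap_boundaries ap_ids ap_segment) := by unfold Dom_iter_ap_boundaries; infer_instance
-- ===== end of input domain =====

-- B replaces A's running last_ap_id/last_ap_idx state machine by filtering the truthy
-- (index, id) pairs once and pairing adjacent ones with zip (objective: simpler).
-- Both programs are generators; equivalence is about the yielded sequence, materialised as a list.

-- ===== PORT A =====
-- Python truthiness of an Optional[str]: None and "" are falsy.
def pvTruthy (o : Option String) : Bool :=
  match o with
  | none => false
  | some s => decide (s ≠ "")

-- A's loop body: state = (yielded so far, last_ap_id, last_ap_idx).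
-- last_ap_idx is only read (`.getD 0`) when last_ap_id is truthy, in which case it is `some _`,
-- exactly as Python's last_ap_idx is only used after being set.
def pvStepA (ap_segment : String)
    (st : List (Option String × Int) × Option String × Option Int)
    (p : Int × Option String) : List (Option String × Int) × Option String × Option Int :=
  let (acc, last_id, last_idx) := st
  if pvTruthy p.2 then
    ((if pvTruthy last_id then
        acc ++ [(last_id, if ap_segment == "end" then last_idx.getD 0 + 1 else p.1)]
      else acc), p.2, some p.1)
  else st

def iter_ap_boundaries (ap_ids : List (Option String)) (ap_segment : String) : List (Option String × Int) :=
  let st := (PySem.List.enumerate ap_ids).foldl (pvStepA ap_segment) ([], none, none)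
  -- for-else: the final yield always happens
  st.1 ++ [(st.2.1, (ap_ids.length : Int))]

-- ===== PORT B =====
-- the pair (prev, cur) ↦ yielded boundary
def pvPair (ap_segment : String) (q : (Int × Option String) × (Int × Option String)) : Option String × Int :=
  (q.1.2, if ap_segment == "end" then q.1.1 + 1 else q.2.1)

def iter_ap_boundaries_alt (ap_ids : List (Option String)) (ap_segment : String) : List (Option String × Int) :=
  let pts := (PySem.List.enumerate ap_ids).filter (fun p => pvTruthy p.2)
  if pts.isEmpty then [(none, (ap_ids.length : Int))]
  else
    (pts.zip pts.tail).map (pvPair ap_segment)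
      ++ [((PySem.List.pyGetD pts (-1) (0, none)).2, (ap_ids.length : Int))]

-- ===== PRECONDITION & SPEC =====
-- Pre_ excludes exactly the inputs where A's assert fails (AssertionError): ap_segment not in ("begin", "end").
def Pre_iter_ap_boundaries (ap_ids : List (Option String)) (ap_segment : String) : Prop :=
  ap_segment = "begin" ∨ ap_segment = "end"
instance (ap_ids : List (Option String)) (ap_segment : String) : Decidable (Pre_iter_ap_boundaries ap_ids ap_segment) := by unfold Pre_iter_ap_boundaries; infer_instance

def pvWitness_iter_ap_boundaries : List (Option String) × String := ([some "a", none, some "b"], "end")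

def Spec_iter_ap_boundaries (ap_ids : List (Option String)) (ap_segment : String) (out : List (Option String × Int)) : Prop := out = iter_ap_boundaries_alt ap_ids ap_segment
instance (ap_ids : List (Option String)) (ap_segment : String) (out : List (Option String × Int)) : Decidable (Spec_iter_ap_boundaries ap_ids ap_segment out) := by unfold Spec_iter_ap_boundaries; infer_instance

-- ===== CLAIM (what is proved, stated in full; the proofs are below) =====
def Claim_equal_iter_ap_boundaries : Prop := ∀ (ap_ids : List (Option String)) (ap_segment : String), Dom_iter_ap_boundaries ap_ids ap_segment → Pre_iter_ap_boundaries ap_ids ap_segment → Spec_iter_ap_boundaries ap_ids ap_segment (iter_ap_boundaries ap_ids ap_segment)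

-- ===== LEMMAS AND PROOFS =====

-- A's fold skips non-truthy elements, so it equals the fold over the filtered list.
theorem foldA_filter (seg : String) (l : List (Int × Option String))
    (st : List (Option String × Int) × Option String × Option Int) :
    l.foldl (pvStepA seg) st = (l.filter (fun p => pvTruthy p.2)).foldl (pvStepA seg) st := by
  induction l generalizing st with
  | nil => rfl
  | cons p l ih =>
    by_cases h : pvTruthy p.2 = true
    · simp [h, List.foldl_cons, ih]
    · have hst : pvStepA seg st p = st := by
        simp [pvStepA, h]
      simp [h, List.foldl_cons, hst, ih]

-- Invariant: once a truthy (i, a) is the running state, A's fold over the remaining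
-- truthy points yields exactly the adjacent-pair boundaries and ends on the last point.
theorem foldA_pairs (seg : String) (pts : List (Int × Option String)) :
    ∀ (acc : List (Option String × Int)) (i : Int) (a : Option String),
    pvTruthy a = true → (∀ p ∈ pts, pvTruthy p.2 = true) →
    pts.foldl (pvStepA seg) (acc, a, some i) =
      (acc ++ (((i, a) :: pts).zip pts).map (pvPair seg),
       (((i, a) :: pts).getLast (by simp)).2,
       some (((i, a) :: pts).getLast (by simp)).1) := by
  induction pts with
  | nil => intro acc i a _ _; simp
  | cons q rest ih =>
    intro acc i a ha hall
    have hq : pvTruthy q.2 = true := hall q (by simp)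
    have hstep : pvStepA seg (acc, a, some i) q =
        (acc ++ [pvPair seg ((i, a), q)], q.2, some q.1) := by
      simp [pvStepA, hq, ha, pvPair]
    rw [List.foldl_cons, hstep,
        ih (acc ++ [pvPair seg ((i, a), q)]) q.1 q.2 hq (fun p hp => hall p (by simp [hp]))]
    simp [List.getLast_cons]

-- ===== VERDICT (by name: the statement is the Claim_ definition above) =====
theorem iter_ap_boundaries_spec : Claim_equal_iter_ap_boundaries := by
  intro ap_ids ap_segment _ _
  unfold Spec_iter_ap_boundaries iter_ap_boundaries iter_ap_boundaries_alt
  rw [foldA_filter]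
  rcases hcase : (PySem.List.enumerate ap_ids).filter (fun p => pvTruthy p.2) with _ | ⟨q, rest⟩
  · rw [hcase]; simp
  · have hmem : ∀ p ∈ q :: rest, pvTruthy p.2 = true := by
      intro p hp
      have hpf : p ∈ (PySem.List.enumerate ap_ids).filter (fun p => pvTruthy p.2) := by
        rw [hcase]; exact hp
      exact (List.mem_filter.mp hpf).2
    have hq : pvTruthy q.2 = true := hmem q (by simp)
    have hfirst : pvStepA ap_segment ([], none, none) q = ([], q.2, some q.1) := by
      simp [pvStepA, hq, show pvTruthy none = false from rfl]
    rw [hcase, List.foldl_cons, hfirst,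
        foldA_pairs ap_segment rest [] q.1 q.2 hq (fun p hp => hmem p (by simp [hp]))]
    have hlast : PySem.List.pyGetD (q :: rest) (-1) ((0 : Int), (none : Option String)) =
        (q :: rest).getLast (by simp) := PySem.List.pyGetD_neg_one _ _ (by simp)
    simp [hlast]
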